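-- pv_equiv track=rewrite | github.com/NobodyFiancee/Tinkoff | АиСД Тинькофф 2024 (100 из 100)/Базовые структуры данных/H.py | max_subsection
-- ===== SOURCE A (Python) =====
-- def get_nearest_smaller_by_index(arr, start, end, step):
--     n = len(arr)
--     stack = []
--     boundaries = [-1] * n
--     for i in range(start, end, step):
--         while stack and arr[stack[-1]] >= arr[i]:
--             stack.pop()
--         if stack:
--             boundaries[i] = stack[-1]
--         stack.append(i)
--     return boundaries
--
-- def max_subsection(arr):
--     n = len(arr)
--     left_boundaries = get_nearest_smaller_by_index(arr, 0, n, 1)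
--     right_boundaries = get_nearest_smaller_by_index(arr, n - 1, -1, -1)
--
--     pref_sum = [0] * (n + 1)
--     for i in range(1, n + 1):
--         pref_sum[i] = pref_sum[i - 1] + arr[i - 1]
--
--     res = 0
--     for i in range(n):
--         left = left_boundaries[i] + 1
--         right = right_boundaries[i] - 1 if right_boundaries[i] != -1 else n - 1
--         res = max(res, arr[i] * (pref_sum[right + 1] - pref_sum[left] if left <= right else 0))
--
--     return res
-- ===== SOURCE B (Python) =====
-- def max_subsection(arr):
--     n = len(arr)
--     res = 0
--     for i in range(n):
--         l, r = i, i
--         while l > 0 and arr[l - 1] >= arr[i]: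
--             l -= 1
--         while r + 1 < n and arr[r + 1] >= arr[i]:
--             r += 1
--         s = 0
--         for j in range(l, r + 1):
--             s += arr[j]
--         res = max(res, arr[i] * s)
--     return res
-- ===== Notes on version B (the rewrite author's own statement) =====
-- stated objective: simpler
-- what changed: Replaces the two monotonic-stack boundary passes and the prefix-sum table with a direct per-element expansion: for each index scan left/right while neighbors are >= arr[i] and sum the window in place.
import Mathlib
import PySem

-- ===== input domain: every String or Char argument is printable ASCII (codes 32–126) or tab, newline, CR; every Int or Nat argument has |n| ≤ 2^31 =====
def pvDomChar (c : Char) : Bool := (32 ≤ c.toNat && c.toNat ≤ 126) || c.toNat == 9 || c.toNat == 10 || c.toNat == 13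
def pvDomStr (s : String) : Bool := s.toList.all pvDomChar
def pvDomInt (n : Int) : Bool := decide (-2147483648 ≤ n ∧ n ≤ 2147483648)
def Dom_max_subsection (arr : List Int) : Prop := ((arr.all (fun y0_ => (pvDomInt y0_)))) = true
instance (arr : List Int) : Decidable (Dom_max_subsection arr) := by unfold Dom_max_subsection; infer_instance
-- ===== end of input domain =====

-- B replaces A's two monotonic-stack boundary passes and prefix-sum table by a direct
-- per-element left/right window expansion with an in-place window sum (simpler, same results).


-- ===== PORT A =====
-- the 'while stack and arr[stack[-1]] >= arr[i]: stack.pop()' loop; stack head = Python stack top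
def popA (arr : List Int) (i : Int) : List Int → List Int
  | [] => []
  | t :: rest =>
    if PySem.List.pyGetD arr i 0 ≤ PySem.List.pyGetD arr t 0 then popA arr i rest
    else t :: rest

-- one iteration of the helper's for-loop (state = (stack, boundaries))
def nearStep (arr : List Int) (sb : List Int × List Int) (i : Int) : List Int × List Int :=
  let st := popA arr i sb.1
  let bnds := match st with
    | [] => sb.2
    | t :: _ => PySem.List.pySetD sb.2 i t
  (i :: st, bnds)

def get_nearest_smaller_by_index (arr : List Int) (start fin step : Int) : List Int :=
  ((PySem.List.pyRange start fin step).foldl (nearStep arr)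
    ([], List.replicate arr.length (-1))).2

def max_subsection (arr : List Int) : Int :=
  let n : Int := (arr.length : Int)
  let lb := get_nearest_smaller_by_index arr 0 n 1
  let rb := get_nearest_smaller_by_index arr (n - 1) (-1) (-1)
  let pref := (PySem.List.pyRange 1 (n + 1) 1).foldl
      (fun ps i => PySem.List.pySetD ps i
        (PySem.List.pyGetD ps (i - 1) 0 + PySem.List.pyGetD arr (i - 1) 0))
      (List.replicate (arr.length + 1) 0)
  (PySem.List.pyRange 0 n 1).foldl
    (fun res i =>
      let left := PySem.List.pyGetD lb i 0 + 1
      let right := if PySem.List.pyGetD rb i 0 ≠ -1 then PySem.List.pyGetD rb i 0 - 1 else n - 1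
      max res (PySem.List.pyGetD arr i 0 *
        (if left ≤ right then PySem.List.pyGetD pref (right + 1) 0 - PySem.List.pyGetD pref left 0
         else 0)))
    0

-- ===== PORT B =====
-- 'while l > 0 and arr[l-1] >= arr[i]: l -= 1'  (l stays in [0, i], so a Nat index is exact)
def goLeftB (arr : List Int) (v : Int) : Nat → Nat
  | 0 => 0
  | l + 1 => if v ≤ arr.getD l 0 then goLeftB arr v l else l + 1

-- 'while r + 1 < n and arr[r+1] >= arr[i]: r += 1'  (structural loop counter d = n - r)
def goRightBAux (arr : List Int) (v : Int) : Nat → Nat → Nat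
  | 0, r => r
  | d + 1, r =>
    if r + 1 < arr.length then
      if v ≤ arr.getD (r + 1) 0 then goRightBAux arr v d (r + 1) else r
    else r

def goRightB (arr : List Int) (v : Int) (r : Nat) : Nat :=
  goRightBAux arr v (arr.length - r) r

def max_subsection_alt (arr : List Int) : Int :=
  (List.range arr.length).foldl
    (fun res i =>
      let v := arr.getD i 0
      let l := goLeftB arr v i
      let r := goRightB arr v i
      let s := (List.range' l (r + 1 - l)).foldl (fun s j => s + arr.getD j 0) 0
      max res (v * s))
    0

-- ===== PRECONDITION & SPEC =====
def Spec_max_subsection (arr : List Int) (out : Int) : Prop := out = max_subsection_alt arr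
instance (arr : List Int) (out : Int) : Decidable (Spec_max_subsection arr out) := by unfold Spec_max_subsection; infer_instance

-- ===== CLAIM (what is proved, stated in full; the proofs are below) =====
def Claim_equal_max_subsection : Prop := ∀ (arr : List Int), Dom_max_subsection arr → Spec_max_subsection arr (max_subsection arr)

-- ===== LEMMAS AND PROOFS =====

-- arr[j] for a Nat index (default 0; every use is in range)
def ag (arr : List Int) (j : Nat) : Int := arr.getD j 0

-- "arr[j] < v" — the keep-condition of a pop loop with pivot value v
def pKeep (arr : List Int) (v : Int) (j : Nat) : Bool := decide (ag arr j < v)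

-- nearest strictly smaller to the left / right (as found by direct scan)
def jstarL (arr : List Int) (v : Int) (i : Nat) : Option Nat :=
  ((List.range i).reverse).find? (pKeep arr v)
def kstarR (arr : List Int) (v : Int) (i : Nat) : Option Nat :=
  (List.range' (i + 1) (arr.length - (i + 1))).find? (pKeep arr v)

def bL (arr : List Int) (i : Nat) : Int :=
  match jstarL arr (ag arr i) i with | some j => (j : Int) | none => -1
def bR (arr : List Int) (i : Nat) : Int :=
  match kstarR arr (ag arr i) i with | some k => (k : Int) | none => -1

-- stack-membership conditions
def QL (arr : List Int) (i j : Nat) : Bool := decide (∀ k < i, j < k → ag arr j < ag arr k)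
def QR (arr : List Int) (m j : Nat) : Bool := decide (∀ k < j, m ≤ k → ag arr j < ag arr k)

lemma goLeftB_eq (arr : List Int) (v : Int) :
    ∀ l, goLeftB arr v l =
      (match ((List.range l).reverse).find? (pKeep arr v) with
       | some j => j + 1 | none => 0) := by
  intro l
  induction l with
  | zero => simp [goLeftB]
  | succ l ih =>
    rw [List.range_succ, List.reverse_append]
    simp only [List.reverse_cons, List.reverse_nil, List.nil_append, List.singleton_append]
    cases hp : pKeep arr v l with
    | true =>
      have h : ¬ v ≤ arr.getD l 0 := by
        simp [pKeep, ag, List.getD_eq_getElem?_getD] at hp ⊢; omega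
      rw [List.find?_cons_of_pos hp]
      simp only [goLeftB]
      rw [if_neg h]
    | false =>
      have h : v ≤ arr.getD l 0 := by
        simp [pKeep, ag, List.getD_eq_getElem?_getD] at hp ⊢; omega
      rw [List.find?_cons_of_neg (by simp [hp])]
      simp only [goLeftB]
      rw [if_pos h]
      exact ih


lemma goRightB_eq (arr : List Int) (v : Int) :
    ∀ r, r < arr.length →
    goRightB arr v r =
      (match (List.range' (r + 1) (arr.length - (r + 1))).find? (pKeep arr v) with
       | some k => k - 1 | none => arr.length - 1) := by
  have H : ∀ d r, arr.length - r = d → r < arr.length →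
      goRightBAux arr v d r =
        (match (List.range' (r + 1) (arr.length - (r + 1))).find? (pKeep arr v) with
         | some k => k - 1 | none => arr.length - 1) := by
    intro d
    induction d with
    | zero => intro r hd hr; omega
    | succ d ih =>
      intro r hd hr
      simp only [goRightBAux]
      by_cases h1 : r + 1 < arr.length
      · have hm : arr.length - (r + 1) = (arr.length - (r + 2)) + 1 := by omega
        rw [hm, List.range'_succ]
        cases hp : pKeep arr v (r + 1) with
        | true =>
          have h : ¬ v ≤ arr.getD (r + 1) 0 := by
            simp [pKeep, ag, List.getD_eq_getElem?_getD] at hp ⊢; omega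
          rw [List.find?_cons_of_pos hp, if_pos h1, if_neg h]
          simp
        | false =>
          have h : v ≤ arr.getD (r + 1) 0 := by
            simp [pKeep, ag, List.getD_eq_getElem?_getD] at hp ⊢; omega
          rw [List.find?_cons_of_neg (by simp [hp]), if_pos h1, if_pos h]
          rw [ih (r + 1) (by omega) h1]
      · have hm : arr.length - (r + 1) = 0 := by omega
        rw [if_neg h1, hm]
        simp only [List.range'_zero, List.find?_nil]
        show r = arr.length - 1
        omega
  intro r hr
  exact H (arr.length - r) r rfl hr


-- a find? may strengthen its predicate by anything true of the FIRST match
lemma find?_congr_first {α : Type} (p q : α → Bool) :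
    ∀ l : List α,
      (∀ l1 x l2, l = l1 ++ x :: l2 → (∀ y ∈ l1, p y = false) → p x = true → q x = true) →
      l.find? (fun x => q x && p x) = l.find? p := by
  intro l
  induction l with
  | nil => intro _; rfl
  | cons a l ih =>
    intro h
    simp only [List.find?]
    cases hp : p a with
    | true =>
      have hq : q a = true := h [] a l rfl (by simp) hp
      simp [hp, hq]
    | false =>
      simp only [hp, Bool.and_false]
      exact ih (fun l1 x l2 heq hpre hx =>
        h (a :: l1) x l2 (by simp [heq]) (by
          intro y hy
          rcases List.mem_cons.mp hy with h1 | h1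
          · exact h1 ▸ hp
          · exact hpre y h1) hx)


lemma filter_eq_dropWhile_of {α : Type} (p : α → Bool) :
    ∀ l : List α, l.Pairwise (fun x y => p x = true → p y = true) →
      l.filter p = l.dropWhile (fun x => !p x) := by
  intro l
  induction l with
  | nil => intro _; rfl
  | cons a l ih =>
    intro hpair
    rcases List.pairwise_cons.mp hpair with ⟨ha, hl⟩
    cases hp : p a with
    | true =>
      have : l.filter p = l := List.filter_eq_self.mpr (fun y hy => ha y hy hp)
      simp [List.filter_cons, List.dropWhile_cons, hp, this]
    | false =>
      simp [List.filter_cons, List.dropWhile_cons, hp, ih hl]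


lemma popA_map (arr : List Int) (i : Nat) (l : List Nat) :
    popA arr (i : Int) (l.map (fun j : Nat => (j : Int))) =
      (l.dropWhile (fun j => !pKeep arr (ag arr i) j)).map (fun j : Nat => (j : Int)) := by
  induction l with
  | nil => simp [popA]
  | cons j l ih =>
    simp only [List.map_cons, popA, PySem.List.pyGetD_natCast]
    cases hp : pKeep arr (ag arr i) j with
    | true =>
      have h : ¬ arr.getD i 0 ≤ arr.getD j 0 := by
        simp [pKeep, ag, List.getD_eq_getElem?_getD] at hp ⊢; omega
      rw [if_neg h, List.dropWhile_cons_of_neg (by simp [hp])]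
      simp
    | false =>
      have h : arr.getD i 0 ≤ arr.getD j 0 := by
        simp [pKeep, ag, List.getD_eq_getElem?_getD] at hp ⊢; omega
      rw [if_pos h, List.dropWhile_cons_of_pos (by simp [hp])]
      exact ih


lemma set_map_range (n : Nat) (f : Nat → Int) (i : Nat) (v : Int) (h : i < n) :
    ((List.range n).map f).set i v = (List.range n).map (fun j => if j = i then v else f j) := by
  apply List.ext_getElem
  · simp
  · intro k h1 h2
    simp only [List.getElem_set, List.getElem_map, List.getElem_range]
    by_cases hk : i = k
    · simp [hk]
    · simp [hk, Ne.symm hk]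


lemma pairwise_range_QL (arr : List Int) (i : Nat) (v : Int) :
    (((List.range i).filter (QL arr i)).reverse).Pairwise
      (fun x y => pKeep arr v x = true → pKeep arr v y = true) := by
  rw [List.pairwise_reverse, List.pairwise_filter, List.pairwise_iff_getElem]
  intro p q h1 h2 hpq
  simp only [List.getElem_range, List.length_range] at *
  intro hQp _hQq hq
  have h2' : q < i := by simpa using h2
  simp only [pKeep, decide_eq_true_eq] at hq ⊢
  simp only [QL, decide_eq_true_eq] at hQp
  exact lt_trans (hQp q h2' hpq) hq

lemma QL_succ (arr : List Int) (i j : Nat) (hj : j < i) :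
    QL arr (i + 1) j = (QL arr i j && pKeep arr (ag arr i) j) := by
  rw [Bool.eq_iff_iff]
  simp only [QL, pKeep, Bool.and_eq_true, decide_eq_true_eq]
  constructor
  · intro h
    exact ⟨fun k hk hjk => h k (by omega) hjk, h i (by omega) hj⟩
  · rintro ⟨h1, h2⟩ k hk hjk
    rcases Nat.lt_succ_iff_lt_or_eq.mp hk with h | h
    · exact h1 k h hjk
    · exact h ▸ h2

lemma QL_self (arr : List Int) (i : Nat) : QL arr (i + 1) i = true := by
  simp only [QL, decide_eq_true_eq]
  intro k hk hik; omega

lemma filter_QL_succ (arr : List Int) (i : Nat) :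
    (List.range (i + 1)).filter (QL arr (i + 1)) =
      ((List.range i).filter (fun j => QL arr i j && pKeep arr (ag arr i) j)) ++ [i] := by
  rw [List.range_succ, List.filter_append]
  congr 1
  · exact List.filter_congr (fun j hj => QL_succ arr i j (List.mem_range.mp hj))
  · simp [QL_self]

lemma popped_head (arr : List Int) (i : Nat) :
    ((((List.range i).filter (fun j => QL arr i j && pKeep arr (ag arr i) j))).reverse).head? =
      jstarL arr (ag arr i) i := by
  rw [← List.filter_reverse, List.head?_filter]
  apply find?_congr_first
  intro l1 x l2 heq hpre hx
  simp only [QL, decide_eq_true_eq]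
  intro k hk hxk
  have hkmem : k ∈ l1 ++ x :: l2 := by
    rw [← heq]; simp only [List.mem_reverse, List.mem_range]; exact hk
  have hpw : (l1 ++ x :: l2).Pairwise (fun a b => b < a) := by
    rw [← heq, List.pairwise_reverse]
    simpa using List.pairwise_lt_range
  have hx2 : ∀ z ∈ l2, z < x := by
    have := (List.pairwise_append.mp hpw).2.1
    intro z hz
    exact (List.pairwise_cons.mp this).1 z hz
  have hk1 : k ∈ l1 := by
    rcases List.mem_append.mp hkmem with h | h
    · exact h
    · rcases List.mem_cons.mp h with h | h
      · omega
      · exact absurd (hx2 k h) (by omega)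
  have := hpre k hk1
  simp only [pKeep, decide_eq_false_iff_not, not_lt] at this
  simp only [pKeep, decide_eq_true_eq] at hx
  exact lt_of_lt_of_le hx this

lemma popA_stackL (arr : List Int) (i : Nat) :
    popA arr (i : Int) ((((List.range i).filter (QL arr i)).reverse).map (fun j : Nat => (j : Int)))
      = ((((List.range i).filter (fun j => QL arr i j && pKeep arr (ag arr i) j))).reverse).map
          (fun j : Nat => (j : Int)) := by
  rw [popA_map]
  congr 1
  rw [← filter_eq_dropWhile_of _ _ (pairwise_range_QL arr i (ag arr i))]
  rw [← List.filter_reverse, ← List.filter_reverse, List.filter_filter]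
  exact List.filter_congr (fun j _ => Bool.and_comm _ _)

lemma passL (arr : List Int) :
    ∀ i, i ≤ arr.length →
      (PySem.List.pyRange 0 (i : Int) 1).foldl (nearStep arr)
          ([], List.replicate arr.length (-1)) =
        (((List.range i).filter (QL arr i)).reverse.map (fun j : Nat => (j : Int)),
         (List.range arr.length).map (fun j => if j < i then bL arr j else (-1 : Int))) := by
  intro i
  induction i with
  | zero =>
    intro _
    rw [show ((0 : Nat) : Int) = 0 from rfl, PySem.List.pyRange_one_eq_nil le_rfl]
    simp only [List.foldl_nil, List.range_zero, List.filter_nil, List.reverse_nil, List.map_nil]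
    refine Prod.ext rfl ?_
    simp only []
    apply List.ext_getElem
    · simp
    · intro k h1 h2
      simp
  | succ i ih =>
    intro h
    rw [show ((i + 1 : Nat) : Int) = (i : Int) + 1 by push_cast; ring]
    rw [PySem.List.pyRange_one_succ_right (by positivity), List.foldl_append, ih (by omega)]
    simp only [List.foldl_cons, List.foldl_nil, nearStep, popA_stackL]
    cases hj : jstarL arr (ag arr i) i with
    | none =>
      have he : (((List.range i).filter
          (fun j => QL arr i j && pKeep arr (ag arr i) j))).reverse = [] := by
        rw [← List.head?_eq_none_iff, popped_head, hj]
      rw [he]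
      refine Prod.ext ?_ ?_
      · simp only [List.map_nil]
        rw [filter_QL_succ, List.reverse_append]
        simp [he]
      · simp only [List.map_nil]
        apply List.map_congr_left
        intro j _
        by_cases hji : j = i
        · subst hji
          simp only [lt_irrefl, if_false, Nat.lt_succ_self, if_true, bL, hj]
        · have : (j < i + 1) ↔ (j < i) := by omega
          simp [this]
    | some j0 =>
      rcases List.head?_eq_some_iff.mp (by rw [popped_head, hj] :
          (((List.range i).filter
            (fun j => QL arr i j && pKeep arr (ag arr i) j))).reverse.head? = some j0) with ⟨t, ht⟩
      rw [ht]
      refine Prod.ext ?_ ?_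
      · simp only [List.map_cons]
        rw [filter_QL_succ, List.reverse_append]
        simp [ht]
      · simp only [List.map_cons]
        rw [PySem.List.pySetD_natCast, set_map_range _ _ _ _ (by omega)]
        apply List.map_congr_left
        intro j _
        by_cases hji : j = i
        · subst hji
          simp only [Nat.lt_succ_self, if_true, bL, hj]
        · have h2 : (j < i + 1) ↔ (j < i) := by omega
          simp [hji, h2]

lemma lbList (arr : List Int) :
    get_nearest_smaller_by_index arr 0 (arr.length : Int) 1 =
      (List.range arr.length).map (bL arr) := by
  unfold get_nearest_smaller_by_index
  rw [passL arr arr.length le_rfl]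
  apply List.map_congr_left
  intro j hj
  simp [List.mem_range.mp hj]

lemma pairwise_range'_QR (arr : List Int) (i : Nat) (v : Int) :
    ((List.range' (i + 1) (arr.length - (i + 1))).filter (QR arr (i + 1))).Pairwise
      (fun x y => pKeep arr v x = true → pKeep arr v y = true) := by
  rw [List.pairwise_filter, List.pairwise_iff_getElem]
  intro p q h1 h2 hpq
  simp only [List.getElem_range'] at *
  intro _hQp hQq hp
  simp only [pKeep, decide_eq_true_eq] at hp ⊢
  simp only [QR, decide_eq_true_eq] at hQq
  exact lt_trans (hQq (i + 1 + 1 * p) (by omega) (by omega)) hp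

lemma QR_succ (arr : List Int) (i j : Nat) (hj : i < j) :
    QR arr i j = (QR arr (i + 1) j && pKeep arr (ag arr i) j) := by
  rw [Bool.eq_iff_iff]
  simp only [QR, pKeep, Bool.and_eq_true, decide_eq_true_eq]
  constructor
  · intro h
    exact ⟨fun k hk hik => h k hk (by omega), h i hj (by omega)⟩
  · rintro ⟨h1, h2⟩ k hk hik
    rcases Nat.lt_or_ge k (i + 1) with h | h
    · have : k = i := by omega
      exact this ▸ h2
    · exact h1 k hk h

lemma QR_self (arr : List Int) (i : Nat) : QR arr i i = true := by
  simp only [QR, decide_eq_true_eq]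
  intro k hk hik; omega

lemma filter_QR_cons (arr : List Int) (i : Nat) :
    (i :: List.range' (i + 1) (arr.length - (i + 1))).filter (QR arr i) =
      i :: ((List.range' (i + 1) (arr.length - (i + 1))).filter
        (fun j => QR arr (i + 1) j && pKeep arr (ag arr i) j)) := by
  rw [List.filter_cons, if_pos (QR_self arr i)]
  congr 1
  apply List.filter_congr
  intro j hj
  exact QR_succ arr i j (by have := (List.mem_range'_1.mp hj).1; omega)

lemma popA_stackR (arr : List Int) (i : Nat) :
    popA arr (i : Int)
        (((List.range' (i + 1) (arr.length - (i + 1))).filter (QR arr (i + 1))).map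
          (fun j : Nat => (j : Int)))
      = (((List.range' (i + 1) (arr.length - (i + 1))).filter
            (fun j => QR arr (i + 1) j && pKeep arr (ag arr i) j))).map
          (fun j : Nat => (j : Int)) := by
  rw [popA_map]
  congr 1
  rw [← filter_eq_dropWhile_of _ _ (pairwise_range'_QR arr i (ag arr i)), List.filter_filter]
  exact List.filter_congr (fun j _ => Bool.and_comm _ _)

lemma popped_headR (arr : List Int) (i : Nat) :
    ((List.range' (i + 1) (arr.length - (i + 1))).filter
        (fun j => QR arr (i + 1) j && pKeep arr (ag arr i) j)).head? =
      kstarR arr (ag arr i) i := by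
  rw [List.head?_filter]
  apply find?_congr_first
  intro l1 x l2 heq hpre hx
  simp only [QR, decide_eq_true_eq]
  intro k hk hik
  have hxm : x ∈ List.range' (i + 1) (arr.length - (i + 1)) := by
    rw [heq]; simp
  have hxb := List.mem_range'_1.mp hxm
  have hkmem : k ∈ l1 ++ x :: l2 := by
    rw [← heq, List.mem_range'_1]; omega
  have hpw : (l1 ++ x :: l2).Pairwise (fun a b => a < b) := by
    rw [← heq]; exact List.pairwise_lt_range' 1
  have hx2 : ∀ z ∈ l2, x < z := by
    have := (List.pairwise_append.mp hpw).2.1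
    intro z hz
    exact (List.pairwise_cons.mp this).1 z hz
  have hk1 : k ∈ l1 := by
    rcases List.mem_append.mp hkmem with h | h
    · exact h
    · rcases List.mem_cons.mp h with h | h
      · omega
      · exact absurd (hx2 k h) (by omega)
  have := hpre k hk1
  simp only [pKeep, decide_eq_false_iff_not, not_lt] at this
  simp only [pKeep, decide_eq_true_eq] at hx
  exact lt_of_lt_of_le hx this

lemma passR (arr : List Int) :
    ∀ i, i ≤ arr.length →
      (((List.range' i (arr.length - i)).reverse).map (fun j : Nat => (j : Int))).foldl
          (nearStep arr) ([], List.replicate arr.length (-1)) =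
        (((List.range' i (arr.length - i)).filter (QR arr i)).map (fun j : Nat => (j : Int)),
         (List.range arr.length).map (fun j => if i ≤ j then bR arr j else (-1 : Int))) := by
  have H : ∀ d i, arr.length - i = d → i ≤ arr.length →
      (((List.range' i (arr.length - i)).reverse).map (fun j : Nat => (j : Int))).foldl
          (nearStep arr) ([], List.replicate arr.length (-1)) =
        (((List.range' i (arr.length - i)).filter (QR arr i)).map (fun j : Nat => (j : Int)),
         (List.range arr.length).map (fun j => if i ≤ j then bR arr j else (-1 : Int))) := by
    intro d
    induction d with
    | zero =>
      intro i hd hi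
      have hieq : i = arr.length := by omega
      subst hieq
      rw [Nat.sub_self]
      simp only [List.range'_zero, List.reverse_nil, List.map_nil, List.foldl_nil,
        List.filter_nil]
      refine Prod.ext rfl ?_
      apply List.ext_getElem
      · simp
      · intro k h1 h2
        simp only [List.getElem_replicate, List.getElem_map, List.getElem_range]
        rw [if_neg (by simp at h2; omega)]
    | succ d ih =>
      intro i hd hi
      have hin : i < arr.length := by omega
      rw [show arr.length - i = (arr.length - (i + 1)) + 1 by omega, List.range'_succ,
        List.reverse_cons, List.map_append, List.foldl_append,
        ih (i + 1) (by omega) (by omega)]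
      simp only [List.map_cons, List.map_nil, List.foldl_cons, List.foldl_nil, nearStep,
        popA_stackR]
      cases hk : kstarR arr (ag arr i) i with
      | none =>
        have he : (List.range' (i + 1) (arr.length - (i + 1))).filter
            (fun j => QR arr (i + 1) j && pKeep arr (ag arr i) j) = [] := by
          rw [← List.head?_eq_none_iff, popped_headR, hk]
        rw [he]
        refine Prod.ext ?_ ?_
        · simp only [List.map_nil]
          rw [filter_QR_cons, he]
          simp
        · simp only [List.map_nil]
          apply List.map_congr_left
          intro j _
          by_cases hji : j = i
          · subst hji
            simp only [le_refl, if_true, bR, hk]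
            rw [if_neg (by omega)]
          · have h2 : (i ≤ j) ↔ (i + 1 ≤ j) := by omega
            simp [h2]
      | some k0 =>
        rcases List.head?_eq_some_iff.mp (by rw [popped_headR, hk] :
            ((List.range' (i + 1) (arr.length - (i + 1))).filter
              (fun j => QR arr (i + 1) j && pKeep arr (ag arr i) j)).head? = some k0) with ⟨t, ht⟩
        rw [ht]
        refine Prod.ext ?_ ?_
        · simp only [List.map_cons]
          rw [filter_QR_cons, ht]
          simp
        · simp only [List.map_cons]
          rw [PySem.List.pySetD_natCast, set_map_range _ _ _ _ hin]
          apply List.map_congr_left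
          intro j _
          by_cases hji : j = i
          · subst hji
            simp only [le_refl, if_true, bR, hk]
          · have h2 : (i ≤ j) ↔ (i + 1 ≤ j) := by omega
            simp [hji, h2]
  intro i hi
  exact H (arr.length - i) i rfl hi

lemma rbList (arr : List Int) :
    get_nearest_smaller_by_index arr ((arr.length : Int) - 1) (-1) (-1) =
      (List.range arr.length).map (bR arr) := by
  unfold get_nearest_smaller_by_index
  rw [PySem.List.pyRange_neg_one_eq_reverse,
    show ((-1 : Int) + 1) = 0 by norm_num,
    show ((arr.length : Int) - 1) + 1 = ((arr.length : Int)) by ring,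
    PySem.List.pyRange_zero_natCast, ← List.map_reverse]
  have h0 : List.range arr.length = List.range' 0 (arr.length - 0) := by
    rw [Nat.sub_zero, List.range_eq_range']
  conv_lhs => rw [h0]
  rw [passR arr 0 (by omega)]
  apply List.map_congr_left
  intro j _
  simp

lemma prefFold (arr : List Int) :
    ∀ i, i ≤ arr.length →
      (PySem.List.pyRange 1 ((i : Int) + 1) 1).foldl
          (fun ps k => PySem.List.pySetD ps k
            (PySem.List.pyGetD ps (k - 1) 0 + PySem.List.pyGetD arr (k - 1) 0))
          (List.replicate (arr.length + 1) 0) =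
        (List.range (arr.length + 1)).map (fun k => if k ≤ i then (arr.take k).sum else 0) := by
  intro i
  induction i with
  | zero =>
    intro _
    rw [show ((0 : Nat) : Int) + 1 = 1 by norm_num, PySem.List.pyRange_one_eq_nil le_rfl]
    simp only [List.foldl_nil]
    apply List.ext_getElem
    · simp
    · intro k h1 h2
      simp only [List.getElem_replicate, List.getElem_map, List.getElem_range]
      by_cases hk : k ≤ 0
      · rw [if_pos hk, show k = 0 by omega]
        simp
      · rw [if_neg hk]
  | succ i ih =>
    intro h
    have hin : i < arr.length := by omega
    rw [show ((i + 1 : Nat) : Int) + 1 = ((i : Int) + 1) + 1 by push_cast; ring,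
      PySem.List.pyRange_one_succ_right (by omega), List.foldl_append, ih (by omega)]
    simp only [List.foldl_cons, List.foldl_nil]
    rw [show ((i : Int) + 1 - 1) = (i : Int) by ring]
    rw [PySem.List.pyGetD_natCast, PySem.List.pyGetD_natCast,
      PySem.List.getD_map_range _ _ _ _ (by omega), if_pos (le_refl i)]
    rw [show ((i : Int) + 1) = ((i + 1 : Nat) : Int) by push_cast; ring,
      PySem.List.pySetD_natCast, set_map_range _ _ _ _ (by omega)]
    apply List.map_congr_left
    intro k _
    by_cases hk : k = i + 1
    · subst hk
      rw [if_pos rfl, if_pos (le_refl _), List.sum_take_succ arr i hin,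
        List.getD_eq_getElem arr 0 hin]
    · have h2 : (k ≤ i + 1) ↔ (k ≤ i) := by omega
      simp [hk, h2]

lemma sumFold (arr : List Int) :
    ∀ (m l : Nat) (s0 : Int),
      (List.range' l m).foldl (fun s j => s + arr.getD j 0) s0 =
        s0 + ((arr.drop l).take m).sum := by
  intro m
  induction m with
  | zero => intro l s0; simp
  | succ m ih =>
    intro l s0
    rw [List.range'_succ]
    simp only [List.foldl_cons]
    rw [ih (l + 1) (s0 + arr.getD l 0)]
    by_cases hl : l < arr.length
    · rw [List.drop_eq_getElem_cons hl, List.take_succ_cons, List.sum_cons,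
        List.getD_eq_getElem arr 0 hl]
      ring
    · have h1 : arr.drop l = [] := List.drop_eq_nil_of_le (by omega)
      have h2 : arr.drop (l + 1) = [] := List.drop_eq_nil_of_le (by omega)
      have h3 : arr[l]? = none := List.getElem?_eq_none (by omega)
      simp [h1, h2, h3, List.getD_eq_getElem?_getD]


lemma take_sum_diff (arr : List Int) (l r : Nat) (h : l ≤ r + 1) :
    (arr.take (r + 1)).sum - (arr.take l).sum = ((arr.drop l).take (r + 1 - l)).sum := by
  conv_lhs => rw [show r + 1 = l + (r + 1 - l) from by omega]
  rw [List.take_add, List.sum_append]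
  ring


lemma final_step (arr : List Int) (res : Int) (i L R : Nat) (_hin : i < arr.length)
    (hL : L ≤ i) (hR : i ≤ R) (hRn : R < arr.length)
    (hBL : goLeftB arr (arr.getD i 0) i = L) (hBR : goRightB arr (arr.getD i 0) i = R) :
    max res (arr.getD i 0 *
      (if ((L : Int)) ≤ ((R : Int)) then
        PySem.List.pyGetD
          ((List.range (arr.length + 1)).map (fun k => if k ≤ arr.length then (arr.take k).sum else 0))
          ((R : Int) + 1) 0 -
        PySem.List.pyGetD
          ((List.range (arr.length + 1)).map (fun k => if k ≤ arr.length then (arr.take k).sum else 0))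
          ((L : Int)) 0
      else 0)) =
    max res (arr.getD i 0 *
      (List.range' (goLeftB arr (arr.getD i 0) i)
        (goRightB arr (arr.getD i 0) i + 1 - goLeftB arr (arr.getD i 0) i)).foldl
        (fun s j => s + arr.getD j 0) 0) := by
  rw [hBL, hBR, if_pos (by exact_mod_cast le_trans hL hR)]
  rw [show ((R : Int) + 1) = ((R + 1 : Nat) : Int) by push_cast; ring]
  rw [PySem.List.pyGetD_natCast, PySem.List.pyGetD_natCast,
    PySem.List.getD_map_range _ _ _ _ (by omega),
    PySem.List.getD_map_range _ _ _ _ (by omega),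
    if_pos (by omega : R + 1 ≤ arr.length), if_pos (by omega : L ≤ arr.length)]
  rw [take_sum_diff arr L R (by omega), sumFold]
  simp

-- ===== VERDICT (by name: the statement is the Claim_ definition above) =====
theorem max_subsection_spec : Claim_equal_max_subsection := by
  intro arr _
  show max_subsection arr = max_subsection_alt arr
  unfold max_subsection max_subsection_alt
  simp only [lbList, rbList, prefFold arr arr.length le_rfl, PySem.List.pyRange_zero_natCast,
    List.foldl_map]
  apply PySem.List.foldl_congr_mem
  intro res i hi
  have hin : i < arr.length := List.mem_range.mp hi
  have e1 : PySem.List.pyGetD arr (i : Int) 0 = arr.getD i 0 := PySem.List.pyGetD_natCast arr i 0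
  have e2 : PySem.List.pyGetD ((List.range arr.length).map (bL arr)) (i : Int) 0 = bL arr i := by
    rw [PySem.List.pyGetD_natCast, PySem.List.getD_map_range _ _ _ _ hin]
  have e3 : PySem.List.pyGetD ((List.range arr.length).map (bR arr)) (i : Int) 0 = bR arr i := by
    rw [PySem.List.pyGetD_natCast, PySem.List.getD_map_range _ _ _ _ hin]
  rw [e1, e2, e3]
  have hBL0 := goLeftB_eq arr (ag arr i) i
  have hBR0 := goRightB_eq arr (ag arr i) i hin
  cases hj : jstarL arr (ag arr i) i with
  | some j =>
    have hjlt : j < i := by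
      have hm := List.mem_of_find?_eq_some hj
      simp only [List.mem_reverse, List.mem_range] at hm
      exact hm
    rw [show ((List.range i).reverse).find? (pKeep arr (ag arr i)) = some j from hj] at hBL0
    have hA1 : bL arr i + 1 = ((j + 1 : Nat) : Int) := by
      simp only [bL, hj]; omega
    rw [hA1]
    cases hk : kstarR arr (ag arr i) i with
    | some k =>
      have hkb : i + 1 ≤ k ∧ k < arr.length := by
        have hm := List.mem_of_find?_eq_some hk
        rw [List.mem_range'_1] at hm
        omega
      rw [show (List.range' (i + 1) (arr.length - (i + 1))).find? (pKeep arr (ag arr i)) = some k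
        from hk] at hBR0
      have hA2 : (if bR arr i ≠ -1 then bR arr i - 1 else (arr.length : Int) - 1) =
          ((k - 1 : Nat) : Int) := by
        have hb : bR arr i = (k : Int) := by simp only [bR, hk]
        rw [hb, if_pos (by omega : (k : Int) ≠ -1)]
        omega
      rw [hA2]
      exact final_step arr res i (j + 1) (k - 1) hin (by omega) (by omega) (by omega) hBL0 hBR0
    | none =>
      rw [show (List.range' (i + 1) (arr.length - (i + 1))).find? (pKeep arr (ag arr i)) = none
        from hk] at hBR0
      have hA2 : (if bR arr i ≠ -1 then bR arr i - 1 else (arr.length : Int) - 1) =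
          ((arr.length - 1 : Nat) : Int) := by
        have hb : bR arr i = -1 := by simp only [bR, hk]
        rw [hb, if_neg (by simp)]
        omega
      rw [hA2]
      exact final_step arr res i (j + 1) (arr.length - 1) hin (by omega) (by omega) (by omega)
        hBL0 hBR0
  | none =>
    rw [show ((List.range i).reverse).find? (pKeep arr (ag arr i)) = none from hj] at hBL0
    have hA1 : bL arr i + 1 = ((0 : Nat) : Int) := by
      simp only [bL, hj]; omega
    rw [hA1]
    cases hk : kstarR arr (ag arr i) i with
    | some k =>
      have hkb : i + 1 ≤ k ∧ k < arr.length := by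
        have hm := List.mem_of_find?_eq_some hk
        rw [List.mem_range'_1] at hm
        omega
      rw [show (List.range' (i + 1) (arr.length - (i + 1))).find? (pKeep arr (ag arr i)) = some k
        from hk] at hBR0
      have hA2 : (if bR arr i ≠ -1 then bR arr i - 1 else (arr.length : Int) - 1) =
          ((k - 1 : Nat) : Int) := by
        have hb : bR arr i = (k : Int) := by simp only [bR, hk]
        rw [hb, if_pos (by omega : (k : Int) ≠ -1)]
        omega
      rw [hA2]
      exact final_step arr res i 0 (k - 1) hin (by omega) (by omega) (by omega) hBL0 hBR0
    | none =>
      rw [show (List.range' (i + 1) (arr.length - (i + 1))).find? (pKeep arr (ag arr i)) = none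
        from hk] at hBR0
      have hA2 : (if bR arr i ≠ -1 then bR arr i - 1 else (arr.length : Int) - 1) =
          ((arr.length - 1 : Nat) : Int) := by
        have hb : bR arr i = -1 := by simp only [bR, hk]
        rw [hb, if_neg (by simp)]
        omega
      rw [hA2]
      exact final_step arr res i 0 (arr.length - 1) hin (by omega) (by omega) (by omega)
        hBL0 hBR0
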